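-- pv_equiv track=rewrite | github.com/Judeqiu/weagents-public | skills/investment-banking/scripts/generate-buyer-list.py | categorize_buyers
-- ===== SOURCE A (Python) =====
-- from typing import List, Dict
--
-- def categorize_buyers(strategic: List[Dict], financial: List[Dict], target_name: str) -> Dict:
--     """Categorize and prioritize buyers."""
--
--     categories = {
--         "Tier 1 - High Priority": [],
--         "Tier 2 - Medium Priority": [],
--         "Tier 3 - Lower Priority": [],
--     }
--
--     # Strategic categorization
--     for buyer in strategic:
--         if buyer["fit"] == "High":
--             categories["Tier 1 - High Priority"].append({
--                 **buyer,
--                 "category": "Strategic",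
--                 "priority": "High"
--             })
--         elif buyer["fit"] == "Medium":
--             categories["Tier 2 - Medium Priority"].append({
--                 **buyer,
--                 "category": "Strategic",
--                 "priority": "Medium"
--             })
--         else:
--             categories["Tier 3 - Lower Priority"].append({
--                 **buyer,
--                 "category": "Strategic",
--                 "priority": "Low"
--             })
--
--     # Financial categorization
--     for buyer in financial:
--         if buyer["fit"] == "High":
--             categories["Tier 1 - High Priority"].append({
--                 **buyer,
--                 "category": "Financial",
--                 "priority": "High"
--             })
--         elif buyer["fit"] == "Medium":
--             categories["Tier 2 - Medium Priority"].append({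
--                 **buyer,
--                 "category": "Financial",
--                 "priority": "Medium"
--             })
--         else:
--             categories["Tier 3 - Lower Priority"].append({
--                 **buyer,
--                 "category": "Financial",
--                 "priority": "Low"
--             })
--
--     return categories
-- ===== SOURCE B (Python) =====
-- from typing import List, Dict
--
-- def categorize_buyers(strategic: List[Dict], financial: List[Dict], target_name: str) -> Dict:
--     """Categorize and prioritize buyers."""
--     labeled = [(b, "Strategic") for b in strategic] + [(b, "Financial") for b in financial]
--
--     def tier(priority, pred):
--         return [
--             {**b, "category": cat, "priority": priority}
--             for (b, cat) in labeled
--             if pred(b["fit"])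
--         ]
--
--     return {
--         "Tier 1 - High Priority": tier("High", lambda f: f == "High"),
--         "Tier 2 - Medium Priority": tier("Medium", lambda f: f == "Medium"),
--         "Tier 3 - Lower Priority": tier("Low", lambda f: f != "High" and f != "Medium"),
--     }
-- ===== Notes on version B (the rewrite author's own statement) =====
-- stated objective: alternative
-- what changed: Instead of one imperative pass appending into mutable tier lists with an if/elif/else per buyer, B labels the two input lists once and builds each tier directly as a filtered comprehension over the combined labeled list.
import Mathlib
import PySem

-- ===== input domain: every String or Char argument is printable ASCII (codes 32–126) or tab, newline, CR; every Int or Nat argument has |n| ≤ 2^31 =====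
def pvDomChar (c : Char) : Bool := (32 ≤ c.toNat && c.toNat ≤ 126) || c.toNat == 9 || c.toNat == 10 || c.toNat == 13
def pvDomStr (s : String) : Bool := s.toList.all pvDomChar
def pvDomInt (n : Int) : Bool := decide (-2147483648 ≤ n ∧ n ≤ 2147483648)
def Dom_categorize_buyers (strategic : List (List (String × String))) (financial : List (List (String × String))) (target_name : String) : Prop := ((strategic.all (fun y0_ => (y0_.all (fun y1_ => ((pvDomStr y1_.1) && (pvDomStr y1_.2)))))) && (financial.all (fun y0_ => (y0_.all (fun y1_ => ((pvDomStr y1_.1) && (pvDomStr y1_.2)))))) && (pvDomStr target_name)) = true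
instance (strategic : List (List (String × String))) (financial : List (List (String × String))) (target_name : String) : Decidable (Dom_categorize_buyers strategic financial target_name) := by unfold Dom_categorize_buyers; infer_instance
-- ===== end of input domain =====

-- B rebuilds the same three tiers by filtering one labeled list per tier instead of A's
-- single imperative pass that appends into the matching tier via if/elif/else (objective: alternative).
-- Buyers are Python dicts, ported as association lists with unique keys (via PySem.Dict).

-- ===== PORT A =====
-- {**buyer, "category": cat, "priority": pri} (shared by both ports: the identical dict merge) — dict unpacking then two overwrites, exact via PySem.Dict.insert
def tagA (b : List (String × String)) (cat pri : String) : List (String × String) :=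
  (((PySem.Dict.mk b).insert "category" cat).insert "priority" pri).items

-- one iteration of either of A's loops: append the tagged buyer into the tier picked by buyer["fit"]
def stepA (cat : String)
    (st : List (List (String × String)) × List (List (String × String)) × List (List (String × String)))
    (b : List (String × String)) :
    List (List (String × String)) × List (List (String × String)) × List (List (String × String)) :=
  let fit := (PySem.Dict.mk b).getD "fit" ""   -- buyer["fit"]; Pre_ guarantees the key is present
  if fit == "High" then (st.1 ++ [tagA b cat "High"], st.2.1, st.2.2)
  else if fit == "Medium" then (st.1, st.2.1 ++ [tagA b cat "Medium"], st.2.2)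
  else (st.1, st.2.1, st.2.2 ++ [tagA b cat "Low"])

def categorize_buyers (strategic : List (List (String × String))) (financial : List (List (String × String))) (target_name : String) : List (String × List (List (String × String))) :=
  let st1 := strategic.foldl (stepA "Strategic") ([], [], [])
  let st2 := financial.foldl (stepA "Financial") st1
  [("Tier 1 - High Priority", st2.1),
   ("Tier 2 - Medium Priority", st2.2.1),
   ("Tier 3 - Lower Priority", st2.2.2)]

-- ===== PORT B =====
-- B's comprehension builds {**b, "category": cat, "priority": priority}: the same merge, reusing tagA

def categorize_buyers_alt (strategic : List (List (String × String))) (financial : List (List (String × String))) (target_name : String) : List (String × List (List (String × String))) :=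
  let labeled := strategic.map (fun b => (b, "Strategic")) ++ financial.map (fun b => (b, "Financial"))
  let tier := fun (pri : String) (pred : String → Bool) =>
    (labeled.filter (fun bc => pred ((PySem.Dict.mk bc.1).getD "fit" ""))).map (fun bc => tagA bc.1 bc.2 pri)
  [("Tier 1 - High Priority", tier "High" (fun f => f == "High")),
   ("Tier 2 - Medium Priority", tier "Medium" (fun f => f == "Medium")),
   ("Tier 3 - Lower Priority", tier "Low" (fun f => f != "High" && f != "Medium"))]

-- ===== PRECONDITION & SPEC =====
-- Pre_ excludes buyers lacking the "fit" key: there A raises KeyError (buyer["fit"]).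
def Pre_categorize_buyers (strategic : List (List (String × String))) (financial : List (List (String × String))) (target_name : String) : Prop :=
  ((strategic ++ financial).all (fun b => (PySem.Dict.mk b).contains "fit")) = true
instance (strategic : List (List (String × String))) (financial : List (List (String × String))) (target_name : String) : Decidable (Pre_categorize_buyers strategic financial target_name) := by unfold Pre_categorize_buyers; infer_instance

def pvWitness_categorize_buyers : (List (List (String × String))) × (List (List (String × String))) × String :=
  ([[("name", "a"), ("fit", "High")], [("fit", "Low")]], [[("fit", "Medium")]], "t")

def Spec_categorize_buyers (strategic : List (List (String × String))) (financial : List (List (String × String))) (target_name : String) (out : List (String × List (List (String × String)))) : Prop := out = categorize_buyers_alt strategic financial target_name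
instance (strategic : List (List (String × String))) (financial : List (List (String × String))) (target_name : String) (out : List (String × List (List (String × String)))) : Decidable (Spec_categorize_buyers strategic financial target_name out) := by unfold Spec_categorize_buyers; infer_instance

-- ===== CLAIM (what is proved, stated in full; the proofs are below) =====
def Claim_equal_categorize_buyers : Prop := ∀ (strategic : List (List (String × String))) (financial : List (List (String × String))) (target_name : String), Dom_categorize_buyers strategic financial target_name → Pre_categorize_buyers strategic financial target_name → Spec_categorize_buyers strategic financial target_name (categorize_buyers strategic financial target_name)

-- ===== LEMMAS AND PROOFS =====

-- one tier of B, over an arbitrary labeled list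
def tierOf (labeled : List (List (String × String) × String)) (pri : String) (pred : String → Bool) : List (List (String × String)) :=
  (labeled.filter (fun bc => pred ((PySem.Dict.mk bc.1).getD "fit" ""))).map (fun bc => tagA bc.1 bc.2 pri)

lemma tierOf_cons (b : List (String × String)) (c : String) (l : List (List (String × String) × String)) (pri : String) (pred : String → Bool) :
    tierOf ((b, c) :: l) pri pred =
      (if pred ((PySem.Dict.mk b).getD "fit" "") then [tagA b c pri] else []) ++ tierOf l pri pred := by
  simp [tierOf, List.filter]
  split_ifs with h <;> simp [h]

lemma tierOf_append (l₁ l₂ : List (List (String × String) × String)) (pri : String) (pred : String → Bool) :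
    tierOf (l₁ ++ l₂) pri pred = tierOf l₁ pri pred ++ tierOf l₂ pri pred := by
  simp [tierOf, List.filter_append]

-- A's loop over one list, from any accumulator, appends exactly B's three filtered tiers for that list
lemma foldA_eq (cat : String) (l : List (List (String × String)))
    (t1 t2 t3 : List (List (String × String))) :
    l.foldl (stepA cat) (t1, t2, t3) =
      (t1 ++ tierOf (l.map (fun b => (b, cat))) "High" (fun f => f == "High"),
       t2 ++ tierOf (l.map (fun b => (b, cat))) "Medium" (fun f => f == "Medium"),
       t3 ++ tierOf (l.map (fun b => (b, cat))) "Low" (fun f => f != "High" && f != "Medium")) := by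
  induction l generalizing t1 t2 t3 with
  | nil => simp [tierOf]
  | cons b rest ih =>
    rw [List.foldl_cons, List.map_cons, tierOf_cons, tierOf_cons, tierOf_cons]
    by_cases h1 : ((PySem.Dict.mk b).getD "fit" "") = "High"
    · rw [show stepA cat (t1, t2, t3) b = (t1 ++ [tagA b cat "High"], t2, t3) from by
        simp [stepA, h1], ih]
      simp [h1, tagA]
    · by_cases h2 : ((PySem.Dict.mk b).getD "fit" "") = "Medium"
      · rw [show stepA cat (t1, t2, t3) b = (t1, t2 ++ [tagA b cat "Medium"], t3) from by
          simp [stepA, h1, h2], ih]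
        simp [h1, h2, tagA]
      · rw [show stepA cat (t1, t2, t3) b = (t1, t2, t3 ++ [tagA b cat "Low"]) from by
          simp [stepA, h1, h2], ih]
        simp [h1, h2, tagA]

lemma alt_eq (s f : List (List (String × String))) (t : String) :
    categorize_buyers_alt s f t =
      [("Tier 1 - High Priority", tierOf (s.map (fun b => (b, "Strategic")) ++ f.map (fun b => (b, "Financial"))) "High" (fun g => g == "High")),
       ("Tier 2 - Medium Priority", tierOf (s.map (fun b => (b, "Strategic")) ++ f.map (fun b => (b, "Financial"))) "Medium" (fun g => g == "Medium")),
       ("Tier 3 - Lower Priority", tierOf (s.map (fun b => (b, "Strategic")) ++ f.map (fun b => (b, "Financial"))) "Low" (fun g => g != "High" && g != "Medium"))] := rfl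

-- ===== VERDICT (by name: the statement is the Claim_ definition above) =====
theorem categorize_buyers_spec : Claim_equal_categorize_buyers := by
  intro s f t _ _
  unfold Spec_categorize_buyers categorize_buyers
  simp only [alt_eq, tierOf_append, foldA_eq, List.nil_append]
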